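-- pv_equiv track=rewrite | github.com/yeastgenome/SGDFrontend | src/sgd/tools/seqtools/__init__.py | format_gcg
-- ===== SOURCE A (Python) =====
-- def format_gcg(sequence):
--
--     BASES_PER_LINE = 60
--     BASES_PER_CHUNK = 10
--
--     seqlen = len(sequence)
--     maxIndexLen = len(str(seqlen))
--
--     if len(sequence) <= BASES_PER_CHUNK:
--         return "1 " + sequence + str(seqlen) + "\n"
--
--     ## adding spaces between 10 bases chunks
--     newseq = sequence[0:BASES_PER_CHUNK]
--     sequence = sequence[BASES_PER_CHUNK:]
--
--     while len(sequence) > BASES_PER_CHUNK: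
--         newseq += " " + sequence[0:BASES_PER_CHUNK]
--         sequence = sequence[BASES_PER_CHUNK:]
--     newseq += " " + sequence
--
--     ## adding newlines and index label
--     index = 1
--     sequence = newseq
--     j = int(BASES_PER_LINE + BASES_PER_LINE/BASES_PER_CHUNK)
--     newseq = " "*(maxIndexLen-1) + "1 " + sequence[0:j] + "\n"
--     if seqlen <= BASES_PER_LINE:
--         return newseq
--     sequence = sequence[j:]
--     while len(sequence) > j:
--         index += BASES_PER_LINE
--         newseq += " "*(maxIndexLen-len(str(index))) + str(index) + " " + sequence[0:j] + "\n"
--         sequence = sequence[j:]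
--
--     if sequence:
--         index += BASES_PER_LINE
--         newseq += " "*(maxIndexLen-len(str(index))) + str(index) + " " + sequence + "\n"
--
--     return newseq
-- ===== SOURCE B (Python) =====
-- def format_gcg(sequence):
--     seqlen = len(sequence)
--     if seqlen <= 10:
--         return "1 " + sequence + str(seqlen) + "\n"
--     width = len(str(seqlen))
--
--     def spaced(block):
--         # 10-base chunks of one window separated by single spaces
--         return block if len(block) <= 10 else block[:10] + " " + spaced(block[10:])
--
--     out = ""
--     for start in range(0, seqlen, 60):
--         label = " " * (width - len(str(start + 1))) + str(start + 1) + " "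
--         tail = "\n" if seqlen <= start + 60 else " \n"
--         out += label + spaced(sequence[start:start + 60]) + tail
--     return out
-- ===== Notes on version B (the rewrite author's own statement) =====
-- stated objective: faster
-- what changed: B makes one indexed pass over 60-base windows of the original sequence, building each labelled line directly from its window, instead of A's two sequential rewriting passes that first build a fully-spaced copy by repeatedly re-slicing a shrinking string and then re-cut that copy into 66-character lines.
import Mathlib
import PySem

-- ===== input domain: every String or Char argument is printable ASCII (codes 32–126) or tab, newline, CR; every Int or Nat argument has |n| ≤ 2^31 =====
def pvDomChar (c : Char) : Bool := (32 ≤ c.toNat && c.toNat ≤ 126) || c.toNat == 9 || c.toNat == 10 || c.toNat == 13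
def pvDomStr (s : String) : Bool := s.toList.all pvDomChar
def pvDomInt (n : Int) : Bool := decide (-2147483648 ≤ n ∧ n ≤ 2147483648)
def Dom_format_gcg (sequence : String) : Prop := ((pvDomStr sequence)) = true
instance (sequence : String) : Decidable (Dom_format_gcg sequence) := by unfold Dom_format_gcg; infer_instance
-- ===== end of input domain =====

-- B makes one indexed pass over 60-base windows of the source, building each labelled line
-- directly, instead of A's two rewriting passes that re-slice a shrinking copy of the whole
-- string; objective: faster (A's repeated re-slicing is quadratic, B is a single linear scan).


-- ===== PORT A =====
-- while len(sequence) > 10: newseq += " " + sequence[0:10]; sequence = sequence[10:]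
-- then newseq += " " + sequence   (all slice bounds are nonnegative literals: take/drop is exact there)
def pvChunkLoopA (newseq rest : List Char) : List Char :=
  if 10 < rest.length then
    pvChunkLoopA (newseq ++ ' ' :: rest.take 10) (rest.drop 10)
  else newseq ++ ' ' :: rest
termination_by rest.length
decreasing_by simp; omega

-- while len(sequence) > j: index += 60; newseq += " "*(maxIndexLen-len(str(index))) + str(index) + " " + sequence[0:j] + "\n"; sequence = sequence[j:]
-- then: if sequence: index += 60; newseq += " "*(maxIndexLen-len(str(index))) + str(index) + " " + sequence + "\n"
def pvLineLoopA (maxIL : Nat) (index : Int) (acc rest : List Char) : List Char :=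
  if 66 < rest.length then
    pvLineLoopA maxIL (index + 60)
      (acc ++ (List.replicate (maxIL - (PySem.Int.toChars (index + 60)).length) ' ' ++
        PySem.Int.toChars (index + 60) ++ ' ' :: rest.take 66 ++ ['\n']))
      (rest.drop 66)
  else if rest = [] then acc
  else acc ++ (List.replicate (maxIL - (PySem.Int.toChars (index + 60)).length) ' ' ++
        PySem.Int.toChars (index + 60) ++ ' ' :: rest ++ ['\n'])
termination_by rest.length
decreasing_by simp; omega

def format_gcg (sequence : String) : String :=
  let s := sequence.toList
  let seqlen := s.length
  let maxIndexLen := (PySem.Int.toChars (seqlen : Int)).length   -- len(str(seqlen))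
  if seqlen ≤ 10 then
    String.ofList ('1' :: ' ' :: (s ++ PySem.Int.toChars (seqlen : Int) ++ ['\n']))
  else
    let newseq := pvChunkLoopA (s.take 10) (s.drop 10)
    -- j = int(60 + 60/10) = 66
    let firstLine := List.replicate (maxIndexLen - 1) ' ' ++ '1' :: ' ' :: newseq.take 66 ++ ['\n']
    if seqlen ≤ 60 then String.ofList firstLine
    else String.ofList (pvLineLoopA maxIndexLen 1 firstLine (newseq.drop 66))

-- ===== PORT B =====
-- spaced(block): 10-base chunks of one window separated by single spaces
def pvSpaced (b : List Char) : List Char :=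
  if b.length ≤ 10 then b else b.take 10 ++ ' ' :: pvSpaced (b.drop 10)
termination_by b.length
decreasing_by simp; omega

-- label = " "*(width-len(str(start+1))) + str(start+1) + " "
def pvLabel (width : Nat) (index : Int) : List Char :=
  List.replicate (width - (PySem.Int.toChars index).length) ' ' ++ PySem.Int.toChars index ++ [' ']

-- the loop body: label + spaced(sequence[start:start+60]) + tail
def pvLineB (width : Nat) (s : List Char) (start : Int) : List Char :=
  pvLabel width (start + 1) ++
  pvSpaced (PySem.List.slice s (some start) (some (start + 60))) ++
  (if (s.length : Int) ≤ start + 60 then ['\n'] else [' ', '\n'])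

def format_gcg_alt (sequence : String) : String :=
  let s := sequence.toList
  let seqlen := s.length
  if seqlen ≤ 10 then
    String.ofList ('1' :: ' ' :: (s ++ PySem.Int.toChars (seqlen : Int) ++ ['\n']))
  else
    -- for start in range(0, seqlen, 60): out += label + spaced(...) + tail
    String.ofList ((PySem.List.pyRange 0 (seqlen : Int) 60).foldl
      (fun acc st => acc ++ pvLineB ((PySem.Int.toChars (seqlen : Int)).length) s st) [])

-- ===== PRECONDITION & SPEC =====
def Spec_format_gcg (sequence : String) (out : String) : Prop := out = format_gcg_alt sequence
instance (sequence : String) (out : String) : Decidable (Spec_format_gcg sequence out) := by unfold Spec_format_gcg; infer_instance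

-- ===== CLAIM (what is proved, stated in full; the proofs are below) =====
def Claim_equal_format_gcg : Prop := ∀ (sequence : String), Dom_format_gcg sequence → Spec_format_gcg sequence (format_gcg sequence)

-- ===== LEMMAS AND PROOFS =====

-- proof-side recursive description of B's window loop: one line per 60-base window
def pvGo (width : Nat) (index : Int) (rest : List Char) : List Char :=
  if rest.length ≤ 60 then pvLabel width index ++ pvSpaced rest ++ ['\n']
  else pvLabel width index ++ pvSpaced (rest.take 60) ++ [' ', '\n'] ++
    pvGo width (index + 60) (rest.drop 60)
termination_by rest.length
decreasing_by simp; omega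

-- A's spacing loop is B's spaced, prefixed by the accumulator and a space
theorem chunkLoop_eq (n : Nat) (s : List Char) (hn : s.length ≤ n) (acc : List Char) :
    pvChunkLoopA acc s = acc ++ ' ' :: pvSpaced s := by
  induction n generalizing s acc with
  | zero =>
      rw [pvChunkLoopA, if_neg (by omega)]
      conv_rhs => rw [pvSpaced]
      rw [if_pos (by omega)]
  | succ n ih =>
      by_cases h : 10 < s.length
      · rw [pvChunkLoopA, if_pos h, ih (s.drop 10) (by rw [List.length_drop]; omega)]
        conv_rhs => rw [pvSpaced]
        rw [if_neg (by omega)]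
        simp
      · rw [pvChunkLoopA, if_neg h]
        conv_rhs => rw [pvSpaced]
        rw [if_pos (by omega)]

-- length of a spaced block: exact for full windows, bounded in general (division-free forms)
theorem spaced_len_exact (k : Nat) (s : List Char) (h : s.length = 10 * (k + 1)) :
    (pvSpaced s).length = 10 * (k + 1) + k := by
  induction k generalizing s with
  | zero => rw [pvSpaced, if_pos (by omega)]; omega
  | succ k ih =>
      rw [pvSpaced, if_neg (by omega)]
      have hd : (s.drop 10).length = 10 * (k + 1) := by rw [List.length_drop]; omega
      simp [ih (s.drop 10) hd]
      omega

theorem spaced_len_le (k : Nat) (s : List Char) (h : s.length ≤ 10 * (k + 1)) :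
    (pvSpaced s).length ≤ 10 * (k + 1) + k := by
  induction k generalizing s with
  | zero => rw [pvSpaced, if_pos (by omega)]; omega
  | succ k ih =>
      by_cases h10 : s.length ≤ 10
      · rw [pvSpaced, if_pos h10]; omega
      · rw [pvSpaced, if_neg h10]
        have := ih (s.drop 10) (by rw [List.length_drop]; omega)
        simp
        omega

theorem spaced_ne_nil (s : List Char) (h : s ≠ []) : pvSpaced s ≠ [] := by
  rw [pvSpaced]
  by_cases h10 : s.length ≤ 10
  · rwa [if_pos h10]
  · rw [if_neg h10]
    simp

-- splitting off a full 60-base window commutes with spacing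
theorem spaced_window_gen (k : Nat) (a b : List Char) (ha : a.length = 10 * (k + 1))
    (hb : b ≠ []) : pvSpaced (a ++ b) = pvSpaced a ++ ' ' :: pvSpaced b := by
  induction k generalizing a with
  | zero =>
      have hbl : 0 < b.length := List.length_pos_iff.mpr hb
      rw [pvSpaced, if_neg (by simp; omega)]
      rw [List.take_append_of_le_length (by omega), List.drop_append_of_le_length (by omega)]
      rw [List.take_of_length_le (by omega), List.drop_of_length_le (by omega)]
      have ha' : pvSpaced a = a := by rw [pvSpaced]; exact if_pos (by omega)
      rw [ha']
      simp
  | succ k ihk =>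
      have hbl : 0 < b.length := List.length_pos_iff.mpr hb
      rw [pvSpaced, if_neg (by simp; omega)]
      rw [List.take_append_of_le_length (by omega), List.drop_append_of_le_length (by omega)]
      rw [ihk (a.drop 10) (by rw [List.length_drop]; omega)]
      have ha' : pvSpaced a = a.take 10 ++ ' ' :: pvSpaced (a.drop 10) := by
        rw [pvSpaced]; exact if_neg (by omega)
      rw [ha']
      simp

-- the spaced form of a >60-base remainder splits as "first 66 spaced chars (incl. a trailing
-- space) ++ spaced rest", exactly where A's line loop cuts
theorem spaced_split (r : List Char) (h60 : 60 < r.length) :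
    pvSpaced r = pvSpaced (r.take 60) ++ ' ' :: pvSpaced (r.drop 60) ∧
    (pvSpaced (r.take 60)).length = 65 ∧
    (pvSpaced r).take 66 = pvSpaced (r.take 60) ++ [' '] ∧
    (pvSpaced r).drop 66 = pvSpaced (r.drop 60) := by
  have hd : r.drop 60 ≠ [] := by
    intro he; have := congrArg List.length he; simp at this; omega
  have ht60 : (r.take 60).length = 60 := by rw [List.length_take]; omega
  have hsplit : pvSpaced r = pvSpaced (r.take 60) ++ ' ' :: pvSpaced (r.drop 60) := by
    have h := spaced_window_gen 5 (r.take 60) (r.drop 60) (by omega) hd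
    rw [List.take_append_drop] at h
    exact h
  have hlen60 : (pvSpaced (r.take 60)).length = 65 := by
    have := spaced_len_exact 5 (r.take 60) (by omega)
    omega
  refine ⟨hsplit, hlen60, ?_, ?_⟩
  · rw [hsplit, List.take_append, List.take_of_length_le (by omega), hlen60]
    norm_num
  · rw [hsplit, List.drop_append, List.drop_of_length_le (by omega), hlen60]
    norm_num

-- A's line loop on the spaced remainder equals the window recursion pvGo
theorem lineLoop_eq (n : Nat) (r : List Char) (hn : r.length ≤ n) (hr : r ≠ [])
    (maxIL : Nat) (idx : Int) (acc : List Char) :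
    pvLineLoopA maxIL idx acc (pvSpaced r) = acc ++ pvGo maxIL (idx + 60) r := by
  induction n generalizing r idx acc with
  | zero => exact absurd (List.length_eq_zero_iff.mp (by omega)) hr
  | succ n ih =>
      by_cases h60 : r.length ≤ 60
      · have hlen : (pvSpaced r).length ≤ 65 := by
          have := spaced_len_le 5 r (by omega); omega
        rw [pvLineLoopA, if_neg (by omega), if_neg (spaced_ne_nil r hr)]
        conv_rhs => rw [pvGo]
        rw [if_pos h60]
        simp [pvLabel]
      · obtain ⟨hsplit, hlen60, htake, hdrop⟩ := spaced_split r (by omega)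
        have hd : r.drop 60 ≠ [] := by
          intro he; have := congrArg List.length he; simp at this; omega
        have hdl : 0 < (pvSpaced (r.drop 60)).length :=
          List.length_pos_iff.mpr (spaced_ne_nil _ hd)
        have htotlen : 66 < (pvSpaced r).length := by
          rw [hsplit]; simp [hlen60]; omega
        rw [pvLineLoopA, if_pos htotlen, htake, hdrop,
          ih (r.drop 60) (by rw [List.length_drop]; omega) hd]
        conv_rhs => rw [pvGo]
        rw [if_neg h60]
        simp [pvLabel]

-- after the short case, A's spacing pass produces pvSpaced of the whole input
theorem newseq_eq (s : List Char) (h : 10 < s.length) :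
    pvChunkLoopA (s.take 10) (s.drop 10) = pvSpaced s := by
  rw [chunkLoop_eq (s.drop 10).length (s.drop 10) le_rfl]
  conv_rhs => rw [pvSpaced]
  rw [if_neg (by omega)]

theorem toChars_one : PySem.Int.toChars 1 = ['1'] := by decide

-- step-60 range peels its head element while it is below the bound
theorem pyRange60_cons (a b : Int) (h : a < b) :
    PySem.List.pyRange a b 60 = a :: PySem.List.pyRange (a + 60) b 60 := by
  rw [PySem.List.pyRange_of_pos _ _ (by norm_num : (0:Int) < 60),
      PySem.List.pyRange_of_pos _ _ (by norm_num : (0:Int) < 60), if_pos h]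
  by_cases h2 : a + 60 < b
  · rw [if_pos h2]
    have e0 : b - a + 60 - 1 = (b - (a + 60) + 60 - 1) + 1 * 60 := by ring
    have e1 : (b - a + 60 - 1) / 60 = (b - (a + 60) + 60 - 1) / 60 + 1 := by
      rw [e0, Int.add_mul_ediv_right _ _ (by norm_num)]
    have hnn : 0 ≤ (b - (a + 60) + 60 - 1) / 60 := Int.ediv_nonneg (by omega) (by norm_num)
    have e2 : ((b - a + 60 - 1) / 60).toNat = ((b - (a + 60) + 60 - 1) / 60).toNat + 1 := by
      rw [e1]; omega
    rw [e2, List.range_succ_eq_map]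
    simp only [List.map_cons, List.map_map]
    refine congrArg₂ List.cons (by norm_num) ?_
    apply List.map_congr_left
    intro k _
    simp [Function.comp, Nat.succ_eq_add_one]
    ring
  · rw [if_neg h2]
    have e0 : b - a + 60 - 1 = (b - a - 1) + 1 * 60 := by ring
    have e1 : (b - a - 1) / 60 = 0 := Int.ediv_eq_zero_of_lt (by omega) (by omega)
    have e2 : ((b - a + 60 - 1) / 60).toNat = 1 := by
      rw [e0, Int.add_mul_ediv_right _ _ (by norm_num), e1]
      norm_num
    rw [e2]
    simp

theorem pyRange60_nil (a b : Int) (h : b ≤ a) : PySem.List.pyRange a b 60 = [] := by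
  rw [PySem.List.pyRange_of_pos _ _ (by norm_num : (0:Int) < 60), if_neg (by omega)]
  simp

-- B's flattened loop over window starts is the window recursion pvGo
theorem bRange_eq (n : Nat) (s : List Char) (width : Nat) (start : Nat)
    (hlt : start < s.length) (hn : s.length - start ≤ n) :
    (PySem.List.pyRange (start : Int) (s.length : Int) 60).flatMap (pvLineB width s) =
      pvGo width ((start : Int) + 1) (s.drop start) := by
  induction n generalizing start with
  | zero => omega
  | succ n ih =>
      rw [pyRange60_cons _ _ (by exact_mod_cast hlt), List.flatMap_cons]
      have hslice : PySem.List.slice s (some (start : Int)) (some ((start : Int) + 60)) =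
          (s.drop start).take 60 := by
        have h : ((start : Int) + 60) = ((start + 60 : Nat) : Int) := by push_cast; ring
        rw [h, PySem.List.slice_natCast]
        congr 1
        omega
      by_cases hend : s.length ≤ start + 60
      · have hnil : PySem.List.pyRange ((start : Int) + 60) (s.length : Int) 60 = [] :=
          pyRange60_nil _ _ (by exact_mod_cast hend)
        rw [hnil]
        simp only [List.flatMap_nil, List.append_nil, pvLineB]
        rw [hslice, List.take_of_length_le (by rw [List.length_drop]; omega),
          if_pos (by exact_mod_cast hend)]
        conv_rhs => rw [pvGo]
        rw [if_pos (by rw [List.length_drop]; omega)]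
      · have ihh := ih (start + 60) (by omega) (by omega)
        have hc : ((start + 60 : Nat) : Int) = (start : Int) + 60 := by push_cast; ring
        rw [hc] at ihh
        rw [ihh]
        simp only [pvLineB]
        rw [hslice, if_neg (by omega)]
        conv_rhs => rw [pvGo]
        rw [if_neg (by rw [List.length_drop]; omega)]
        have hidx : (start : Int) + 1 + 60 = (start : Int) + 60 + 1 := by ring
        rw [hidx]
        simp [List.drop_drop]

-- ===== VERDICT (by name: the statement is the Claim_ definition above) =====
theorem format_gcg_spec : Claim_equal_format_gcg := by
  intro sequence _
  unfold Spec_format_gcg format_gcg format_gcg_alt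
  set s := sequence.toList with hs
  by_cases h10 : s.length ≤ 10
  · simp [h10]
  · simp only [h10, if_false]
    have hne : s ≠ [] := by intro he; rw [he] at h10; simp at h10
    rw [newseq_eq s (by omega)]
    set maxIL := (PySem.Int.toChars (s.length : Int)).length with hmil
    rw [PySem.List.foldl_append_eq_flatMap (pvLineB maxIL s)]
    have hB0 := bRange_eq s.length s maxIL 0 (by omega) (by omega)
    simp only [Nat.cast_zero, zero_add, List.drop_zero] at hB0
    rw [List.nil_append, hB0]
    by_cases h60 : s.length ≤ 60
    · have hlen : (pvSpaced s).length ≤ 65 := by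
        have := spaced_len_le 5 s (by omega); omega
      have hB : pvGo maxIL 1 s = pvLabel maxIL 1 ++ pvSpaced s ++ ['\n'] := by
        rw [pvGo]; exact if_pos h60
      rw [if_pos h60, hB, List.take_of_length_le (by omega)]
      simp [pvLabel, toChars_one]
    · obtain ⟨hsplit, hlen60, htake, hdrop⟩ := spaced_split s (by omega)
      have hd : s.drop 60 ≠ [] := by
        intro he; have := congrArg List.length he; simp at this; omega
      have hB : pvGo maxIL 1 s = pvLabel maxIL 1 ++ pvSpaced (s.take 60) ++ [' ', '\n'] ++
          pvGo maxIL (1 + 60) (s.drop 60) := by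
        rw [pvGo]; exact if_neg h60
      rw [if_neg h60, htake, hdrop,
        lineLoop_eq (s.drop 60).length (s.drop 60) le_rfl hd, hB]
      simp [pvLabel, toChars_one]
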